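-- pv_equiv track=rewrite | github.com/pypi-data/pypi-mirror-401 | packages/basicthainlp/basicthainlp-0.5.8-py3-none-any.whl/basicthainlp/pmSeg/PmSeg.py | pmSeg2dataTagList
-- ===== SOURCE A (Python) =====
-- def pmSeg2dataTagList(wordList,tagList):
--     pmList = []
--     prePm = []
--     for (w,c),t in zip(wordList,tagList):
--         if t == 'B' or t == 'BA':
--             if prePm != []:
--                 pmList.append(prePm)
--                 prePm = []
--             prePm.append([w,c,t])
--         else:
--             prePm.append([w,c,t])
--     if prePm != []:
--         pmList.append(prePm)
--     return pmList
-- ===== SOURCE B (Python) =====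
-- def pmSeg2dataTagList(wordList, tagList):
--     # Build the groups back-to-front in one reversed pass:
--     # `start` records whether the token to the right began a new group.
--     groups = []
--     start = True
--     for (w, c), t in reversed(list(zip(wordList, tagList))):
--         if start:
--             groups.insert(0, [[w, c, t]])
--         else:
--             groups[0].insert(0, [w, c, t])
--         start = t == 'B' or t == 'BA'
--     return groups
-- ===== Notes on version B (the rewrite author's own statement) =====
-- stated objective: alternative
-- what changed: B builds the segment list back-to-front in a single reversed pass, deciding group membership from the tag of the token to the right, instead of A's forward pass with an open-group accumulator and final flush.
import Mathlib
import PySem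

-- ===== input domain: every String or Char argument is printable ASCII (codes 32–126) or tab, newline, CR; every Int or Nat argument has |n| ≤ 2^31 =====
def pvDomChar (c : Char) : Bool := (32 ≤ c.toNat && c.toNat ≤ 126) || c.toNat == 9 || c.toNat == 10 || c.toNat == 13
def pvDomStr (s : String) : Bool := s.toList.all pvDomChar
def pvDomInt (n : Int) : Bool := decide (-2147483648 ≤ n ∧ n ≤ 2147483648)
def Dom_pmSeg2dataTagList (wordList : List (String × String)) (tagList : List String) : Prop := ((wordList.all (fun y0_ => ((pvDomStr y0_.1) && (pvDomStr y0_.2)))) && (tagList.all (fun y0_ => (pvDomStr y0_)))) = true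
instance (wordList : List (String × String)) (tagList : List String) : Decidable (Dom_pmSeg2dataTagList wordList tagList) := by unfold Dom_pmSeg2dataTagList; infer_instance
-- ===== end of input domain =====

-- B builds the groups back-to-front in a single reversed pass (different decomposition,
-- same cost); equivalence of the return values is proved for all inputs (both are total).

-- ===== PORT A =====
-- loop body of A: state = (pmList, prePm)
def pvStepA (s : List (List (List String)) × List (List String))
    (x : (String × String) × String) : List (List (List String)) × List (List String) :=
  if x.2 == "B" || x.2 == "BA" then
    if s.2 ≠ [] then (s.1 ++ [s.2], [[x.1.1, x.1.2, x.2]])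
    else (s.1, s.2 ++ [[x.1.1, x.1.2, x.2]])
  else (s.1, s.2 ++ [[x.1.1, x.1.2, x.2]])

-- trailing flush of A: `if prePm != []: pmList.append(prePm)`
def pvFinishA (st : List (List (List String)) × List (List String)) : List (List (List String)) :=
  if st.2 ≠ [] then st.1 ++ [st.2] else st.1

def pmSeg2dataTagList (wordList : List (String × String)) (tagList : List String) : List (List (List String)) :=
  pvFinishA ((List.zip wordList tagList).foldl pvStepA ([], []))

-- ===== PORT B =====
-- loop body of B: state = (groups, start); the [] case of the match is unreachable
-- (start = false only after a token has been placed)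
def pvStepB (s : List (List (List String)) × Bool)
    (x : (String × String) × String) : List (List (List String)) × Bool :=
  let groups :=
    if s.2 then [[x.1.1, x.1.2, x.2]] :: s.1
    else match s.1 with
      | g :: gs => ([x.1.1, x.1.2, x.2] :: g) :: gs
      | [] => [[[x.1.1, x.1.2, x.2]]]
  (groups, x.2 == "B" || x.2 == "BA")

def pmSeg2dataTagList_alt (wordList : List (String × String)) (tagList : List String) : List (List (List String)) :=
  ((List.zip wordList tagList).reverse.foldl pvStepB ([], true)).1

-- ===== PRECONDITION & SPEC =====
def Spec_pmSeg2dataTagList (wordList : List (String × String)) (tagList : List String) (out : List (List (List String))) : Prop := out = pmSeg2dataTagList_alt wordList tagList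
instance (wordList : List (String × String)) (tagList : List String) (out : List (List (List String))) : Decidable (Spec_pmSeg2dataTagList wordList tagList out) := by unfold Spec_pmSeg2dataTagList; infer_instance

-- ===== CLAIM (what is proved, stated in full; the proofs are below) =====
def Claim_equal_pmSeg2dataTagList : Prop := ∀ (wordList : List (String × String)) (tagList : List String), Dom_pmSeg2dataTagList wordList tagList → Spec_pmSeg2dataTagList wordList tagList (pmSeg2dataTagList wordList tagList)

-- ===== LEMMAS AND PROOFS =====

def pvTok (x : (String × String) × String) : List String := [x.1.1, x.1.2, x.2]

def pvIsB (x : (String × String) × String) : Bool := x.2 == "B" || x.2 == "BA"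

-- `pvFlag L = true` iff the first token of L (if any) starts a new group
def pvFlag : List ((String × String) × String) → Bool
  | [] => true
  | y :: _ => pvIsB y

-- the grouping both programs compute
def pvSeg : List ((String × String) × String) → List (List (List String))
  | [] => []
  | x :: L =>
    if pvFlag L then [pvTok x] :: pvSeg L
    else (pvTok x :: (pvSeg L).headI) :: (pvSeg L).tail

@[simp] theorem pvFlag_nil : pvFlag [] = true := rfl
@[simp] theorem pvFlag_cons (x : (String × String) × String) (L : List ((String × String) × String)) :
    pvFlag (x :: L) = pvIsB x := rfl
@[simp] theorem pvSeg_nil : pvSeg [] = [] := rfl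
theorem pvSeg_cons (x : (String × String) × String) (L : List ((String × String) × String)) :
    pvSeg (x :: L) = if pvFlag L then [pvTok x] :: pvSeg L
      else (pvTok x :: (pvSeg L).headI) :: (pvSeg L).tail := rfl

theorem pvSeg_ne_nil (L : List ((String × String) × String)) (h : L ≠ []) : pvSeg L ≠ [] := by
  cases L with
  | nil => exact absurd rfl h
  | cons x L => rw [pvSeg_cons]; split <;> simp

theorem foldr_stepB (L : List ((String × String) × String)) :
    L.foldr (fun x s => pvStepB s x) ([], true) = (pvSeg L, pvFlag L) := by
  induction L with
  | nil => rfl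
  | cons x L ih =>
    rw [List.foldr_cons, ih]
    cases hf : pvFlag L with
    | true => simp [pvStepB, pvSeg_cons, hf, pvTok, pvIsB]
    | false =>
      have hL : L ≠ [] := by intro h; subst h; simp at hf
      obtain ⟨g, gs, hg⟩ := List.exists_cons_of_ne_nil (pvSeg_ne_nil L hL)
      simp [pvStepB, pvSeg_cons, hf, hg, pvTok, pvIsB]

-- what A's loop produces from an open (nonempty) group `pre`
def pvG (pre : List (List String)) (L : List ((String × String) × String)) : List (List (List String)) :=
  if pvFlag L then pre :: pvSeg L
  else (pre ++ (pvSeg L).headI) :: (pvSeg L).tail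

theorem pvG_singleton (x : (String × String) × String) (L : List ((String × String) × String)) :
    pvG [pvTok x] L = pvSeg (x :: L) := by
  rw [pvG, pvSeg_cons]; split <;> simp

theorem pvG_snoc (pre : List (List String)) (x : (String × String) × String)
    (L : List ((String × String) × String)) (hb : pvIsB x = false) :
    pvG pre (x :: L) = pvG (pre ++ [pvTok x]) L := by
  cases hf : pvFlag L with
  | true => simp [pvG, pvSeg_cons, hf, hb]
  | false =>
    have hL : L ≠ [] := by intro h; subst h; simp at hf
    obtain ⟨g, gs, hg⟩ := List.exists_cons_of_ne_nil (pvSeg_ne_nil L hL)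
    simp [pvG, pvSeg_cons, hf, hb, hg]

theorem foldl_stepA (L : List ((String × String) × String)) :
    ∀ (pm : List (List (List String))) (pre : List (List String)), pre ≠ [] →
    pvFinishA (L.foldl pvStepA (pm, pre)) = pm ++ pvG pre L := by
  induction L with
  | nil =>
    intro pm pre hpre
    simp [pvFinishA, pvG, hpre]
  | cons x L ih =>
    intro pm pre hpre
    rw [List.foldl_cons]
    cases hb : pvIsB x with
    | true =>
      have hb' := hb
      simp only [pvIsB, Bool.or_eq_true, beq_iff_eq] at hb'
      have hstep : pvStepA (pm, pre) x = (pm ++ [pre], [[x.1.1, x.1.2, x.2]]) := by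
        rcases hb' with h | h <;> simp [pvStepA, h, hpre]
      rw [hstep, ih (pm ++ [pre]) [[x.1.1, x.1.2, x.2]] (by simp)]
      have ht : ([[x.1.1, x.1.2, x.2]] : List (List String)) = [pvTok x] := rfl
      rw [ht, pvG_singleton]
      simp [pvG, hb]
    | false =>
      have hb' := hb
      simp [pvIsB] at hb'
      have hstep : pvStepA (pm, pre) x = (pm, pre ++ [[x.1.1, x.1.2, x.2]]) := by
        simp [pvStepA, hb'.1, hb'.2]
      rw [hstep, ih pm (pre ++ [[x.1.1, x.1.2, x.2]]) (by simp)]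
      have ht : (pre ++ [[x.1.1, x.1.2, x.2]] : List (List String)) = pre ++ [pvTok x] := rfl
      rw [ht, ← pvG_snoc pre x L hb]

theorem ports_agree (wordList : List (String × String)) (tagList : List String) :
    pmSeg2dataTagList wordList tagList = pmSeg2dataTagList_alt wordList tagList := by
  unfold pmSeg2dataTagList pmSeg2dataTagList_alt
  rw [List.foldl_reverse, foldr_stepB]
  cases hz : List.zip wordList tagList with
  | nil => rfl
  | cons x L =>
    rw [List.foldl_cons]
    have hstep : pvStepA ([], []) x = ([], [[x.1.1, x.1.2, x.2]]) := by
      simp [pvStepA]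
    rw [hstep]
    have h := foldl_stepA L [] [[x.1.1, x.1.2, x.2]] (by simp)
    simp only [List.nil_append] at h
    show pvFinishA (List.foldl pvStepA ([], [[x.1.1, x.1.2, x.2]]) L) = pvSeg (x :: L)
    rw [← pvG_singleton x L]
    exact h

-- ===== VERDICT (by name: the statement is the Claim_ definition above) =====
theorem pmSeg2dataTagList_spec : Claim_equal_pmSeg2dataTagList := by
  intro wordList tagList _
  unfold Spec_pmSeg2dataTagList
  exact ports_agree wordList tagList
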